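-- pv_equiv track=rewrite | github.com/jvanasco/insecure_but_secure_enough | tests/test_core.py | _validate_signed_request_payload
-- ===== SOURCE A (Python) =====
-- from typing import Dict
--
-- def _validate_signed_request_payload(
--     decrypted_payload: Dict,
--     original_data: Dict,
--     algorithm="HMAC-SHA256",
--     issued_at=None,
-- ) -> bool:
--     # ensure everything ORIGINAL is DECRYPTED
--     for i in original_data.keys():
--         if i not in decrypted_payload:
--             return False
--         if original_data[i] != decrypted_payload[i]:
--             return False
--     additions = {}
--     for i in decrypted_payload.keys():
--         if i not in original_data:
--             additions[i] = decrypted_payload[i]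
--     return True
-- ===== SOURCE B (Python) =====
-- def _validate_signed_request_payload(
--     decrypted_payload,
--     original_data,
--     algorithm="HMAC-SHA256",
--     issued_at=None,
-- ) -> bool:
--     # overlay the original data onto the payload; the payload validates iff nothing changes
--     return {**decrypted_payload, **original_data} == decrypted_payload
-- ===== Notes on version B (the rewrite author's own statement) =====
-- stated objective: simpler
-- what changed: Replaces A's per-key membership-and-lookup loop (plus the dead additions loop) by constructing the merged dict {**decrypted_payload, **original_data} and comparing it for equality with the payload: overlaying the original changes nothing iff every original item is already present.
import Mathlib
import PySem

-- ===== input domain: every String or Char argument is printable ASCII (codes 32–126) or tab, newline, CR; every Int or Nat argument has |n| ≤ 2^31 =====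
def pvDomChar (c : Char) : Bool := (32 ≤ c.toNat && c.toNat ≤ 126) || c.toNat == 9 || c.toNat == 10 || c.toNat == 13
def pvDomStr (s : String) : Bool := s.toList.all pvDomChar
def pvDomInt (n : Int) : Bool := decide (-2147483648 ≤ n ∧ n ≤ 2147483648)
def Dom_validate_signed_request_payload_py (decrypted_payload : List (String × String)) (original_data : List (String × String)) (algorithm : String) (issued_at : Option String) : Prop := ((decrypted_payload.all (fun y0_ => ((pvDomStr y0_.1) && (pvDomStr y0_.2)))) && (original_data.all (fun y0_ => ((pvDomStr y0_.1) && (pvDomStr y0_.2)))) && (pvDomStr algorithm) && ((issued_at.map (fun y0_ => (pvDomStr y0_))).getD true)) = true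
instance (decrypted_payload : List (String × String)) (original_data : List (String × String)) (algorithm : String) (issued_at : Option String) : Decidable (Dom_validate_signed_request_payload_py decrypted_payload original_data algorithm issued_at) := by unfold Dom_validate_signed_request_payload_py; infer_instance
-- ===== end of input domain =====

-- ===== PORT A =====
-- B replaces A's per-key membership-and-lookup loop (and A's dead `additions` loop) by
-- building the merged dict {**decrypted_payload, **original_data} and comparing it with the
-- payload; objective: simpler.

-- first loop of A: for i in original_data.keys(): membership + equality checks, early return False
def pvACheck (dpd odd : PySem.Dict String String) : List String → Bool
  | [] => true
  | k :: rest =>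
    if !(PySem.Dict.contains dpd k) then false
    else if !(PySem.Dict.get? odd k == PySem.Dict.get? dpd k) then false
    else pvACheck dpd odd rest

def validate_signed_request_payload_py (decrypted_payload : List (String × String)) (original_data : List (String × String)) (algorithm : String) (issued_at : Option String) : Bool :=
  let dpd := PySem.Dict.ofList decrypted_payload
  let odd := PySem.Dict.ofList original_data
  if !pvACheck dpd odd (PySem.Dict.keys odd) then false
  else
    -- second loop of A: builds `additions`, which is never used
    let _additions := (PySem.Dict.items dpd).foldl
      (fun (acc : PySem.Dict String String) kv =>
        if !(PySem.Dict.contains odd kv.1) then PySem.Dict.insert acc kv.1 kv.2 else acc)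
      PySem.Dict.empty
    true

-- ===== PORT B =====
def validate_signed_request_payload_py_alt (decrypted_payload : List (String × String)) (original_data : List (String × String)) (algorithm : String) (issued_at : Option String) : Bool :=
  let dpd := PySem.Dict.ofList decrypted_payload
  -- {**decrypted_payload, **original_data}: start from the payload, overlay the original items
  let merged := (PySem.Dict.items (PySem.Dict.ofList original_data)).foldl
    (fun (d : PySem.Dict String String) kv => PySem.Dict.insert d kv.1 kv.2) dpd
  -- Python's dict == ignores insertion order: equal size and every item of merged looks up equal in dpd
  (PySem.Dict.size merged == PySem.Dict.size dpd) &&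
    (PySem.Dict.items merged).all (fun kv => PySem.Dict.get? dpd kv.1 == some kv.2)

-- ===== PRECONDITION & SPEC =====
def Spec_validate_signed_request_payload_py (decrypted_payload : List (String × String)) (original_data : List (String × String)) (algorithm : String) (issued_at : Option String) (out : Bool) : Prop := out = validate_signed_request_payload_py_alt decrypted_payload original_data algorithm issued_at
instance (decrypted_payload : List (String × String)) (original_data : List (String × String)) (algorithm : String) (issued_at : Option String) (out : Bool) : Decidable (Spec_validate_signed_request_payload_py decrypted_payload original_data algorithm issued_at out) := by unfold Spec_validate_signed_request_payload_py; infer_instance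

-- ===== CLAIM (what is proved, stated in full; the proofs are below) =====
def Claim_equal_validate_signed_request_payload_py : Prop := ∀ (decrypted_payload : List (String × String)) (original_data : List (String × String)) (algorithm : String) (issued_at : Option String), Dom_validate_signed_request_payload_py decrypted_payload original_data algorithm issued_at → Spec_validate_signed_request_payload_py decrypted_payload original_data algorithm issued_at (validate_signed_request_payload_py decrypted_payload original_data algorithm issued_at)

-- ===== LEMMAS AND PROOFS =====

-- A's loop over the keys of a pair list equals the all-items subset check, provided every
-- listed pair is what the dict lookup returns for its key.
theorem pvACheck_eq_all (dpd odd : PySem.Dict String String) (l : List (String × String))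
    (h : ∀ p ∈ l, PySem.Dict.get? odd p.1 = some p.2) :
    pvACheck dpd odd (l.map Prod.fst) =
      l.all (fun kv => PySem.Dict.get? dpd kv.1 == some kv.2) := by
  induction l with
  | nil => rfl
  | cons p rest ih =>
    have hp : PySem.Dict.get? odd p.1 = some p.2 := h p (List.mem_cons_self)
    have hrest := ih (fun q hq => h q (List.mem_cons_of_mem _ hq))
    simp only [List.map, List.all_cons, pvACheck, hp]
    rw [PySem.Dict.contains_eq_isSome_get?]
    cases hd : PySem.Dict.get? dpd p.1 with
    | none => simp
    | some w =>
      by_cases hvw : p.2 = w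
      · subst hvw; simp [hrest]
      · simp [hvw, Ne.symm hvw]

-- inserting an already-present item is a no-op (on a dict with unique keys)
theorem pv_insert_noop (d : PySem.Dict String String) (k : String) (v : String)
    (hnd : d.keys.Nodup) (h : PySem.Dict.get? d k = some v) :
    PySem.Dict.insert d k v = d := by
  apply PySem.Dict.ext
  have hc : PySem.Dict.contains d k = true := by
    rw [PySem.Dict.contains_eq_isSome_get?, h]; rfl
  rw [PySem.Dict.items_insert_of_contains d v hc]
  have hid : ∀ p ∈ PySem.Dict.items d,
      (fun p : String × String => if (p.1 == k) = true then (k, v) else p) p = id p := by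
    intro p hp
    obtain ⟨a, b⟩ := p
    by_cases hk : a = k
    · subst hk
      have h2 := PySem.Dict.get?_of_mem_items d hp hnd
      have hb : b = v := Option.some.inj (h2.symm.trans h)
      simp [hb]
    · simp [hk]
  rw [List.map_congr_left hid, List.map_id]

-- overlaying items that are all already present leaves the dict unchanged
theorem pv_foldl_insert_noop (l : List (String × String)) (d : PySem.Dict String String)
    (hnd : d.keys.Nodup) (h : ∀ p ∈ l, PySem.Dict.get? d p.1 = some p.2) :
    l.foldl (fun (d : PySem.Dict String String) kv => PySem.Dict.insert d kv.1 kv.2) d = d := by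
  induction l with
  | nil => rfl
  | cons p rest ih =>
    simp only [List.foldl_cons]
    rw [pv_insert_noop d p.1 p.2 hnd (h p List.mem_cons_self)]
    exact ih (fun q hq => h q (List.mem_cons_of_mem _ hq))

-- a key not overlaid keeps its lookup
theorem pv_get?_foldl_insert_of_not_mem (l : List (String × String))
    (d : PySem.Dict String String) (k : String) (h : k ∉ l.map Prod.fst) :
    PySem.Dict.get? (l.foldl (fun (d : PySem.Dict String String) kv => PySem.Dict.insert d kv.1 kv.2) d) k
      = PySem.Dict.get? d k := by
  induction l generalizing d with
  | nil => rfl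
  | cons p rest ih =>
    simp only [List.map_cons, List.mem_cons, not_or] at h
    simp only [List.foldl_cons]
    rw [ih _ h.2, PySem.Dict.get?_insert_of_ne _ _ h.1]

-- each overlaid pair determines the merged lookup (keys of the overlay are unique)
theorem pv_get?_foldl_insert_mem (l : List (String × String)) (d : PySem.Dict String String)
    (k : String) (v : String) (hnd : (l.map Prod.fst).Nodup) (h : (k, v) ∈ l) :
    PySem.Dict.get? (l.foldl (fun (d : PySem.Dict String String) kv => PySem.Dict.insert d kv.1 kv.2) d) k
      = some v := by
  induction l generalizing d with
  | nil => cases h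
  | cons p rest ih =>
    simp only [List.map_cons, List.nodup_cons] at hnd
    simp only [List.foldl_cons]
    rcases List.mem_cons.mp h with h1 | h2
    · subst h1
      rw [pv_get?_foldl_insert_of_not_mem _ _ _ hnd.1, PySem.Dict.get?_insert_self]
    · exact ih _ hnd.2 h2

-- ===== VERDICT (by name: the statement is the Claim_ definition above) =====
theorem validate_signed_request_payload_py_spec : Claim_equal_validate_signed_request_payload_py := by
  intro dp od alg ia _
  unfold Spec_validate_signed_request_payload_py
  unfold validate_signed_request_payload_py validate_signed_request_payload_py_alt
  set dpd := PySem.Dict.ofList dp with hdpd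
  set odd := PySem.Dict.ofList od with hodd
  have hnd_od : odd.keys.Nodup := PySem.Dict.nodup_keys_ofList od
  have hnd_dp : dpd.keys.Nodup := PySem.Dict.nodup_keys_ofList dp
  have hitems : ∀ p ∈ PySem.Dict.items odd, PySem.Dict.get? odd p.1 = some p.2 := by
    intro p hp; obtain ⟨k, v⟩ := p
    exact PySem.Dict.get?_of_mem_items odd hp hnd_od
  have hk : PySem.Dict.keys odd = (PySem.Dict.items odd).map Prod.fst := rfl
  simp only [hk]
  rw [pvACheck_eq_all _ _ _ hitems]
  by_cases hall : ∀ p ∈ PySem.Dict.items odd, PySem.Dict.get? dpd p.1 = some p.2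
  · -- every original item already present: merged = dpd and both sides are true
    rw [pv_foldl_insert_noop _ _ hnd_dp hall]
    have h1 : (PySem.Dict.items odd).all
        (fun kv => PySem.Dict.get? dpd kv.1 == some kv.2) = true := by
      simp only [List.all_eq_true, beq_iff_eq]; exact hall
    have h2 : (PySem.Dict.items dpd).all
        (fun kv => PySem.Dict.get? dpd kv.1 == some kv.2) = true := by
      simp only [List.all_eq_true, beq_iff_eq]
      intro p hp; obtain ⟨k, v⟩ := p
      exact PySem.Dict.get?_of_mem_items dpd hp hnd_dp
    simp [h1, h2]
  · -- some original item is missing or changed: both sides are false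
    push Not at hall
    obtain ⟨p, hpmem, hpne⟩ := hall
    have h1 : (PySem.Dict.items odd).all
        (fun kv => PySem.Dict.get? dpd kv.1 == some kv.2) = false := by
      rw [List.all_eq_false]
      exact ⟨p, hpmem, by simpa using hpne⟩
    -- the merged dict contains p, whose lookup in dpd differs
    have hmerged : PySem.Dict.get?
        ((PySem.Dict.items odd).foldl
          (fun (d : PySem.Dict String String) kv => PySem.Dict.insert d kv.1 kv.2) dpd) p.1
        = some p.2 := by
      have hnodk : ((PySem.Dict.items odd).map Prod.fst).Nodup := hk ▸ hnd_od
      exact pv_get?_foldl_insert_mem _ _ p.1 p.2 hnodk (by simpa using hpmem)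
    have hpin : p ∈ PySem.Dict.items
        ((PySem.Dict.items odd).foldl
          (fun (d : PySem.Dict String String) kv => PySem.Dict.insert d kv.1 kv.2) dpd) := by
      have := PySem.Dict.mem_items_of_get?_eq_some _ hmerged
      simpa using this
    have h2 : (PySem.Dict.items
        ((PySem.Dict.items odd).foldl
          (fun (d : PySem.Dict String String) kv => PySem.Dict.insert d kv.1 kv.2) dpd)).all
        (fun kv => PySem.Dict.get? dpd kv.1 == some kv.2) = false := by
      rw [List.all_eq_false]
      exact ⟨p, hpin, by simpa using hpne⟩
    simp [h1, h2]
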